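-- pv_equiv track=rewrite | github.com/jzamora5/holbertonschool-interview | 0x22-primegame/0-prime_game.py | best_num_option
-- ===== SOURCE A (Python) =====
-- def is_prime(n):
--     """ Checks if a number is a primer number """
--
--     if n <= 1:
--         return False
--
--     flag = False
--     for i in range(2, n):
--         if (n % i) == 0:
--             flag = True
--             break
--
--     return False if flag else True
--
-- def num_of_multiples_in_list(n, arr):
--     """ Counts how many multiples of n are in arr """
--     count = 0
--     for num in arr:
--         if num % n == 0:
--             count += 1
--
--     return count
--
-- def best_num_option(arr):
--     """ Finds the best number to pick in prime game """
--
--     best_option = {"value": None, "multiples": 0}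
--
--     for option in arr:
--         if not is_prime(option):
--             continue
--
--         n_multiples = num_of_multiples_in_list(option, arr)
--         if n_multiples > best_option["multiples"]:
--             best_option["value"] = option
--             best_option["multiples"] = n_multiples
--
--     return best_option["value"]
-- ===== SOURCE B (Python) =====
-- def _is_prime(p):
--     """sqrt-bounded trial division"""
--     if p <= 1:
--         return False
--     d = 2
--     while d * d <= p:
--         if p % d == 0:
--             return False
--         d += 1
--     return True
--
--
-- def best_num_option(arr):
--     """Same result as A: first prime in arr with strictly largest multiple
--     count; duplicates are skipped via a seen-set (a repeat can never beat
--     the strict '>' test), and primality is tested only up to sqrt(p)."""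
--     best = None
--     best_c = 0
--     seen = set()
--     for p in arr:
--         if p in seen:
--             continue
--         seen.add(p)
--         if not _is_prime(p):
--             continue
--         c = sum(1 for x in arr if x % p == 0)
--         if c > best_c:
--             best, best_c = p, c
--     return best
-- ===== Notes on version B (the rewrite author's own statement) =====
-- stated objective: faster
-- what changed: B tests primality by trial division only up to sqrt(p) (A divides by every i in range(2, n)) and skips duplicate elements via a seen-set, which is sound because a repeated value can never beat the strict '>' best-count test.
import Mathlib
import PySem

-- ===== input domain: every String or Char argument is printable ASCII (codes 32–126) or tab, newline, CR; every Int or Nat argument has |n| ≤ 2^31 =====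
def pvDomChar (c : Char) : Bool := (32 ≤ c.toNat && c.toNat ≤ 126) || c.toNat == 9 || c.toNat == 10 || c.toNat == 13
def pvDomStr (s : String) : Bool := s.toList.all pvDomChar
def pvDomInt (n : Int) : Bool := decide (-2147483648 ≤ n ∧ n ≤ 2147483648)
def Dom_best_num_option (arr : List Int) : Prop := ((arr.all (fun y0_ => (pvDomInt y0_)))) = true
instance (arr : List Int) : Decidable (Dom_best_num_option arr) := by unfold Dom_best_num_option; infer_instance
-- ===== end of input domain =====

-- B replaces A's full trial division (range(2, n)) by sqrt-bounded trial division and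
-- skips duplicate elements with a seen-set; same return value on every input.

-- ===== PORT A =====
-- 'for i in range(2, n): if n % i == 0: flag = True; break'
def pvIsPrimeLoopA (n : Int) : List Int → Bool
  | [] => false
  | i :: rest => if PySem.Int.mod n i == 0 then true else pvIsPrimeLoopA n rest

def pvIs_prime (n : Int) : Bool :=
  if n ≤ 1 then false
  else
    let flag := pvIsPrimeLoopA n (PySem.List.pyRange 2 n 1)
    if flag then false else true

def pvNumOfMultiples (n : Int) (arr : List Int) : Int :=
  arr.foldl (fun count num => if PySem.Int.mod num n == 0 then count + 1 else count) 0

def pvAStep (arr : List Int) (st : Option Int × Int) (option : Int) : Option Int × Int :=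
  if !(pvIs_prime option) then st
  else
    let n_multiples := pvNumOfMultiples option arr
    if n_multiples > st.2 then (some option, n_multiples) else st

def best_num_option (arr : List Int) : Option Int :=
  (arr.foldl (pvAStep arr) (none, 0)).1

-- ===== PORT B =====
-- 'd = 2; while d * d <= p: if p % d == 0: return False; d += 1; return True'
def pvAltTrial (p : Int) (d : Int) : Bool :=
  if h : d * d ≤ p then
    if PySem.Int.mod p d == 0 then false else pvAltTrial p (d + 1)
  else true
termination_by (p + 2 - d).toNat
decreasing_by
  have hd : d ≤ p := by nlinarith [sq_nonneg d, sq_nonneg (d - 1)]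
  omega

def pvIs_prime_alt (p : Int) : Bool :=
  if p ≤ 1 then false else pvAltTrial p 2

-- 'sum(1 for x in arr if x % p == 0)'
def pvCountMult (p : Int) (arr : List Int) : Int :=
  ((arr.filter (fun x => PySem.Int.mod x p == 0)).map (fun _ => (1 : Int))).sum

def pvBStep (arr : List Int) (st : Option Int × Int × PySem.Set Int) (p : Int) :
    Option Int × Int × PySem.Set Int :=
  if st.2.2.contains p then st
  else
    let seen' := PySem.Set.add st.2.2 p
    if !(pvIs_prime_alt p) then (st.1, st.2.1, seen')
    else
      let c := pvCountMult p arr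
      if c > st.2.1 then (some p, c, seen') else (st.1, st.2.1, seen')

def best_num_option_alt (arr : List Int) : Option Int :=
  (arr.foldl (pvBStep arr) (none, 0, PySem.Set.empty)).1

-- ===== PRECONDITION & SPEC =====
def Spec_best_num_option (arr : List Int) (out : Option Int) : Prop := out = best_num_option_alt arr
instance (arr : List Int) (out : Option Int) : Decidable (Spec_best_num_option arr out) := by unfold Spec_best_num_option; infer_instance

-- ===== CLAIM (what is proved, stated in full; the proofs are below) =====
def Claim_equal_best_num_option : Prop := ∀ (arr : List Int), Dom_best_num_option arr → Spec_best_num_option arr (best_num_option arr)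

-- ===== LEMMAS AND PROOFS =====

-- A's inner loop is an existence test over the list
theorem pvIsPrimeLoopA_eq_any (n : Int) (l : List Int) :
    pvIsPrimeLoopA n l = l.any (fun i => PySem.Int.mod n i == 0) := by
  induction l with
  | nil => rfl
  | cons i rest ih =>
    simp only [pvIsPrimeLoopA, List.any_cons, ih]
    by_cases h : PySem.Int.mod n i == 0 <;> simp [h]

-- B's while loop is a bounded universal test
theorem pvAltTrial_eq (p : Int) : ∀ (d : Int), 0 ≤ d →
    (pvAltTrial p d = true ↔ (∀ k : Int, d ≤ k → k * k ≤ p → ¬ k ∣ p)) := by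
  refine pvAltTrial.induct p
    (fun d => 0 ≤ d → (pvAltTrial p d = true ↔ (∀ k : Int, d ≤ k → k * k ≤ p → ¬ k ∣ p)))
    ?_ ?_ ?_
  · intro d h hmod _
    unfold pvAltTrial
    simp only [dif_pos h, if_pos hmod]
    have hdvd : d ∣ p := by
      rw [← PySem.Int.mod_eq_zero_iff_dvd]
      exact eq_of_beq hmod
    simp only [Bool.false_eq_true, false_iff]
    intro hall
    exact hall d le_rfl h hdvd
  · intro d h hmod ih hd
    unfold pvAltTrial
    simp only [dif_pos h, if_neg hmod]
    rw [ih (by omega)]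
    constructor
    · intro hall k hk hkk
      rcases eq_or_lt_of_le hk with rfl | hlt
      · intro hdvd
        exact hmod (beq_of_eq ((PySem.Int.mod_eq_zero_iff_dvd _ _).mpr hdvd))
      · exact hall k (by omega) hkk
    · intro hall k hk hkk
      exact hall k (by omega) hkk
  · intro d h hd
    unfold pvAltTrial
    simp only [dif_neg h, true_iff]
    intro k hk hkk
    exfalso
    exact h (le_trans (by nlinarith) hkk)

-- a composite has a divisor below its square root (Int form)
theorem pvDivisor_iff (n : Int) (hn : 1 < n) :
    (¬ ∃ i : Int, (2 ≤ i ∧ i < n) ∧ i ∣ n) ↔ (∀ k : Int, 2 ≤ k → k * k ≤ n → ¬ k ∣ n) := by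
  constructor
  · intro hno k hk hkk hdvd
    apply hno
    refine ⟨k, ⟨hk, ?_⟩, hdvd⟩
    nlinarith
  · intro hall ⟨i, ⟨hi2, hilt⟩, hdvd⟩
    obtain ⟨j, hj⟩ := hdvd
    have hj0 : 0 < j := by nlinarith
    have hj2 : 2 ≤ j := by
      rcases (by omega : j = 1 ∨ 2 ≤ j) with rfl | h
      · omega
      · exact h
    by_cases hii : i * i ≤ n
    · exact hall i hi2 hii ⟨j, hj⟩
    · have hji : j < i := by nlinarith
      have : j * j ≤ n := by nlinarith
      exact hall j hj2 this ⟨i, by rw [hj]; ring⟩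

-- primality agreement
theorem pvPrime_agree (n : Int) : pvIs_prime n = pvIs_prime_alt n := by
  by_cases h1 : n ≤ 1
  · simp [pvIs_prime, pvIs_prime_alt, h1]
  · have hn : 1 < n := by omega
    simp only [pvIs_prime, pvIs_prime_alt, if_neg h1]
    rw [pvIsPrimeLoopA_eq_any]
    have hany : ((PySem.List.pyRange 2 n 1).any (fun i => PySem.Int.mod n i == 0) = true)
        ↔ ∃ i : Int, (2 ≤ i ∧ i < n) ∧ i ∣ n := by
      simp [List.any_eq_true, PySem.List.mem_pyRange_one, PySem.Int.mod_eq_zero_iff_dvd, and_assoc]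
    rw [Bool.eq_iff_iff, pvAltTrial_eq n 2 (by omega), ← pvDivisor_iff n hn]
    by_cases hb : (PySem.List.pyRange 2 n 1).any (fun i => PySem.Int.mod n i == 0) = true
    · simp [hb, hany.mp hb]
    · rw [if_neg hb]
      simp only [true_iff]
      rw [← hany]
      exact hb

-- count agreement
theorem pvCount_agree (p : Int) (arr : List Int) :
    pvCountMult p arr = pvNumOfMultiples p arr := by
  unfold pvCountMult pvNumOfMultiples
  rw [PySem.List.foldl_count_if (fun num => PySem.Int.mod num p == 0) arr 0]
  rw [List.map_const', List.sum_replicate]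
  simp [List.countP_eq_length_filter]

-- main fold invariant: any already-seen prime's multiple count is at most the running best,
-- so B's duplicate skip never changes the state A would reach
theorem pvFold_agree (arr : List Int) (rest : List Int) : ∀ (best : Option Int) (bc : Int)
    (seen : PySem.Set Int),
    (∀ q, q ∈ seen → pvIs_prime q = true → pvNumOfMultiples q arr ≤ bc) →
    rest.foldl (pvAStep arr) (best, bc)
      = ((rest.foldl (pvBStep arr) (best, bc, seen)).1,
         (rest.foldl (pvBStep arr) (best, bc, seen)).2.1) := by
  induction rest with
  | nil => intro best bc seen _; rfl
  | cons p rest ih =>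
    intro best bc seen hinv
    simp only [List.foldl_cons]
    by_cases hseen : PySem.Set.contains seen p = true
    · have hp_mem : p ∈ seen := (PySem.Set.contains_iff seen p).mp hseen
      have hA : pvAStep arr (best, bc) p = (best, bc) := by
        unfold pvAStep
        by_cases hp : pvIs_prime p = true
        · have hle := hinv p hp_mem hp
          simp only [hp, Bool.not_true, Bool.false_eq_true, if_false]
          rw [if_neg (by omega)]
        · simp [hp]
      have hB : pvBStep arr (best, bc, seen) p = (best, bc, seen) := by
        unfold pvBStep
        simp only [hseen, if_true]
      rw [hA, hB]
      exact ih best bc seen hinv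
    · have hcf : PySem.Set.contains seen p = false := (Bool.not_eq_true _).mp hseen
      have hmem_add : ∀ q, q ∈ PySem.Set.add seen p ↔ q ∈ seen ∨ q = p := by
        intro q; exact PySem.Set.mem_add seen p q
      unfold pvAStep pvBStep
      simp only [hcf, Bool.false_eq_true, if_false]
      rw [← pvPrime_agree p, pvCount_agree p arr]
      by_cases hp : pvIs_prime p = true
      · simp only [hp, Bool.not_true, Bool.false_eq_true, if_false]
        by_cases hc : pvNumOfMultiples p arr > bc
        · rw [if_pos hc, if_pos hc]
          apply ih
          intro q hq hqp
          rcases (hmem_add q).mp hq with h | rfl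
          · exact le_trans (hinv q h hqp) (by omega)
          · exact le_rfl
        · rw [if_neg hc, if_neg hc]
          apply ih
          intro q hq hqp
          rcases (hmem_add q).mp hq with h | rfl
          · exact hinv q h hqp
          · omega
      · simp only [hp, Bool.not_false, if_true]
        apply ih
        intro q hq hqp
        rcases (hmem_add q).mp hq with h | rfl
        · exact hinv q h hqp
        · rw [hqp] at hp; exact absurd rfl hp

-- ===== VERDICT (by name: the statement is the Claim_ definition above) =====
theorem best_num_option_spec : Claim_equal_best_num_option := by
  intro arr _
  unfold Spec_best_num_option best_num_option best_num_option_alt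
  rw [pvFold_agree arr arr none 0 PySem.Set.empty (by intro q hq; simp [PySem.Set.empty] at hq)]
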